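-- pv_equiv track=rewrite | github.com/soupglasses/snippets | spongebob.py | spongebob_imperative
-- ===== SOURCE A (Python) =====
-- def spongebob_imperative(text: str) -> str:
--     letters = []
--     pos = 0
--     for letter in text:
--         if letter.isalpha():
--             if pos % 2 == 0:
--                 letters.append(letter.upper())
--             else:
--                 letters.append(letter.lower())
--             pos += 1
--         else:
--             letters.append(letter)
--     return "".join(letters)
-- ===== SOURCE B (Python) =====
-- def spongebob_imperative(text: str) -> str:
--     cased = iter(
--         c.upper() if i % 2 == 0 else c.lower()
--         for i, c in enumerate(ch for ch in text if ch.isalpha())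
--     )
--     return "".join(next(cased) if ch.isalpha() else ch for ch in text)
-- ===== Notes on version B (the rewrite author's own statement) =====
-- stated objective: alternative
-- what changed: Replaces the single fused loop with a manual pos counter by two passes: first build the stream of alternately-cased letters from only the alphabetic characters (enumerate over a filter), then merge that stream back over the original text, keeping non-letters in place.
import Mathlib
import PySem

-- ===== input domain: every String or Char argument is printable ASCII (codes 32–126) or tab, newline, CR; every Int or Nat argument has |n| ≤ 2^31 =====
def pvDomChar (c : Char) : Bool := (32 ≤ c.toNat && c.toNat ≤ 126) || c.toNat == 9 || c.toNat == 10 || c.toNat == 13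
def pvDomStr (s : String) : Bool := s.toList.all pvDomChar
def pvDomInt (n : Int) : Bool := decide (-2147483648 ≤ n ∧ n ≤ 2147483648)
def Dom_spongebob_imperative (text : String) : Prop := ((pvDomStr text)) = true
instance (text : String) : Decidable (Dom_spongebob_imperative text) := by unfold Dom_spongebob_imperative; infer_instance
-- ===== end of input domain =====

-- B replaces A's single fused loop (manual pos counter) by two passes: build the
-- alternately-cased letter stream from the filtered letters, then merge it back over the text.


-- ===== PORT A =====
-- literal port of A: one fold over the characters carrying (letters, pos)
def spongebob_imperative (text : String) : String :=
  String.mk (text.toList.foldl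
    (fun (st : List Char × Nat) letter =>
      if PySem.Chars.isalpha letter then
        (st.1 ++ [if st.2 % 2 == 0 then PySem.Chars.upperChar letter
                  else PySem.Chars.lowerChar letter], st.2 + 1)
      else (st.1 ++ [letter], st.2))
    ([], 0)).1

-- ===== PORT B =====
-- pass 1 of Source B: enumerate the alphabetic characters and case them alternately
def pvCasedStream (cs : List Char) : List Char :=
  (PySem.List.enumerate (cs.filter PySem.Chars.isalpha) 0).map
    (fun p => if p.1 % 2 == 0 then PySem.Chars.upperChar p.2 else PySem.Chars.lowerChar p.2)

-- pass 2 of Source B: walk the original text, consuming the stream at alphabetic positions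
def pvMerge : List Char → List Char → List Char
  | [], _ => []
  | c :: cs, stream =>
    if PySem.Chars.isalpha c then
      match stream with
      | x :: rest => x :: pvMerge cs rest
      | [] => pvMerge cs []
    else c :: pvMerge cs stream

def spongebob_imperative_alt (text : String) : String :=
  String.mk (pvMerge text.toList (pvCasedStream text.toList))

-- ===== PRECONDITION & SPEC =====
def Spec_spongebob_imperative (text : String) (out : String) : Prop := out = spongebob_imperative_alt text
instance (text : String) (out : String) : Decidable (Spec_spongebob_imperative text out) := by unfold Spec_spongebob_imperative; infer_instance

-- ===== CLAIM (what is proved, stated in full; the proofs are below) =====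
def Claim_equal_spongebob_imperative : Prop := ∀ (text : String), Dom_spongebob_imperative text → Spec_spongebob_imperative text (spongebob_imperative text)

-- ===== LEMMAS AND PROOFS =====

-- the cased stream started at counter value pos (proof-side recursive characterisation)
def pvCasedFrom (pos : Nat) : List Char → List Char
  | [] => []
  | c :: cs =>
    if PySem.Chars.isalpha c then
      (if pos % 2 == 0 then PySem.Chars.upperChar c else PySem.Chars.lowerChar c)
        :: pvCasedFrom (pos + 1) cs
    else pvCasedFrom pos cs

lemma pvCasedStream_eq_from (cs : List Char) (n : Nat) :
    (PySem.List.enumerate (cs.filter PySem.Chars.isalpha) (n : Int)).map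
      (fun p => if p.1 % 2 == 0 then PySem.Chars.upperChar p.2 else PySem.Chars.lowerChar p.2)
      = pvCasedFrom n cs := by
  induction cs generalizing n with
  | nil => simp [pvCasedFrom, PySem.List.enumerate_nil]
  | cons c cs ih =>
    by_cases h : PySem.Chars.isalpha c
    · have hmod : ((n : Int) % 2 == 0) = (n % 2 == 0) := by
        have h2 : (n : Int) % 2 = ((n % 2 : Nat) : Int) := by omega
        rw [h2]
        rcases Nat.mod_two_eq_zero_or_one n with h | h <;> simp [h]
      have := ih (n + 1)
      simp only [pvCasedFrom, List.filter_cons, h, if_pos, PySem.List.enumerate_cons,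
        List.map_cons, hmod]
      rw [show ((n : Int) + 1) = ((n + 1 : Nat) : Int) by push_cast; ring, this]
    · simp only [pvCasedFrom, List.filter_cons, h, if_neg, Bool.false_eq_true,
        not_false_eq_true, ih n]

-- loop invariant: A's fold from (acc, pos) produces acc ++ merged result with the stream from pos
lemma pvFold_eq_merge (cs : List Char) (acc : List Char) (pos : Nat) :
    (cs.foldl
      (fun (st : List Char × Nat) letter =>
        if PySem.Chars.isalpha letter then
          (st.1 ++ [if st.2 % 2 == 0 then PySem.Chars.upperChar letter
                    else PySem.Chars.lowerChar letter], st.2 + 1)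
        else (st.1 ++ [letter], st.2))
      (acc, pos)).1 = acc ++ pvMerge cs (pvCasedFrom pos cs) := by
  induction cs generalizing acc pos with
  | nil => simp [pvMerge]
  | cons c cs ih =>
    by_cases h : PySem.Chars.isalpha c
    · simp only [List.foldl_cons, h, if_pos, pvCasedFrom, pvMerge, ih]
      simp
    · simp only [List.foldl_cons, h, if_neg, Bool.false_eq_true, not_false_eq_true,
        pvCasedFrom, pvMerge, ih]
      simp [h]

-- ===== VERDICT (by name: the statement is the Claim_ definition above) =====
theorem spongebob_imperative_spec : Claim_equal_spongebob_imperative := by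
  intro text _
  show spongebob_imperative text = spongebob_imperative_alt text
  unfold spongebob_imperative spongebob_imperative_alt pvCasedStream
  have h := pvCasedStream_eq_from text.toList 0
  simp only [Nat.cast_zero] at h
  rw [h, pvFold_eq_merge]
  simp
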